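-- pv_equiv track=rewrite | github.com/jponf/df-inspector | csvinspector/repl.py | compute_parentheses_balance
-- ===== SOURCE A (Python) =====
-- def compute_parentheses_balance(text: str):
--     balance = 0
--     for c in text:
--         if c == '(':
--             balance += 1
--         elif c == ')':
--             balance -= 1
--     return balance
-- ===== SOURCE B (Python) =====
-- def compute_parentheses_balance(text: str):
--     return text.count('(') - text.count(')')
-- ===== Notes on version B (the rewrite author's own statement) =====
-- stated objective: idiomatic
-- what changed: Replaces the single explicit accumulation loop with a closed expression of two independent str.count scans combined by subtraction, maintaining no running balance variable; the C-level str.count makes it measurably faster.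
import Mathlib
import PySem

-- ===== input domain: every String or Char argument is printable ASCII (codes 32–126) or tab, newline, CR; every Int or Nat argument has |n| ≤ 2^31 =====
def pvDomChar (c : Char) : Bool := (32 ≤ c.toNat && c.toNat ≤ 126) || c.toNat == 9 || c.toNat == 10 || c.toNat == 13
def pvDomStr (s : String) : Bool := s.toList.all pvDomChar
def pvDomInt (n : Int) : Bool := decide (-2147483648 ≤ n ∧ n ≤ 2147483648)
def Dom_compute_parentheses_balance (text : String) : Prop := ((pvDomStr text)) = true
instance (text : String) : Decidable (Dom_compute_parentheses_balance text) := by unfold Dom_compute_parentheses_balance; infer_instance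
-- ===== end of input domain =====

-- B computes the balance as text.count('(') - text.count(')') instead of A's running-balance loop: idiomatic closed expression, measurably faster via C-level str.count.


-- ===== PORT A =====
-- balance starts at 0; for each character, '(' adds 1, ')' subtracts 1
def compute_parentheses_balance (text : String) : Int :=
  text.toList.foldl
    (fun balance c =>
      if c == '(' then balance + 1
      else if c == ')' then balance - 1
      else balance) 0

-- ===== PORT B =====
-- text.count('(') - text.count(')')
def compute_parentheses_balance_alt (text : String) : Int :=
  (PySem.Str.count text "(" : Int) - (PySem.Str.count text ")" : Int)

-- ===== PRECONDITION & SPEC =====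
def Spec_compute_parentheses_balance (text : String) (out : Int) : Prop := out = compute_parentheses_balance_alt text
instance (text : String) (out : Int) : Decidable (Spec_compute_parentheses_balance text out) := by unfold Spec_compute_parentheses_balance; infer_instance

-- ===== CLAIM (what is proved, stated in full; the proofs are below) =====
def Claim_equal_compute_parentheses_balance : Prop := ∀ (text : String), Dom_compute_parentheses_balance text → Spec_compute_parentheses_balance text (compute_parentheses_balance text)

-- ===== LEMMAS AND PROOFS =====

-- str.count with a single-character needle is the element count (unwinds PySem.Chars.count's fuel loop)
theorem pv_count_go_single (c : Char) : ∀ (fuel : Nat) (l : List Char) (acc : Nat), l.length ≤ fuel →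
    PySem.Chars.count.go [c] fuel l acc = acc + l.count c := by
  intro fuel
  induction fuel with
  | zero => intro l acc h; simp at h; subst h; simp [PySem.Chars.count.go]
  | succ n ih =>
    intro l acc h
    cases l with
    | nil => simp [PySem.Chars.count.go]
    | cons x t =>
      simp only [PySem.Chars.count.go]
      by_cases hx : x = c
      · subst hx
        simp [List.isPrefixOf, ih t _ (by simpa using h)]
        omega
      · simp [List.isPrefixOf, hx, ih t _ (by simpa using h), Ne.symm hx]

theorem pv_count_single (s : List Char) (c : Char) : PySem.Chars.count s [c] = s.count c := by
  simp [PySem.Chars.count, pv_count_go_single c s.length s 0 (le_refl _)]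

-- A's running balance over any suffix, from any accumulator
theorem pv_foldl_balance (l : List Char) : ∀ (a : Int),
    l.foldl (fun balance c => if c == '(' then balance + 1
             else if c == ')' then balance - 1 else balance) a
      = a + (l.count '(' : Int) - (l.count ')' : Int) := by
  induction l with
  | nil => intro a; simp
  | cons x t ih =>
    intro a
    rw [List.foldl_cons, ih]
    by_cases h1 : x = '('
    · subst h1; simp; ring
    · by_cases h2 : x = ')'
      · subst h2; simp [h1]; ring
      · simp [h1, h2]

-- ===== VERDICT (by name: the statement is the Claim_ definition above) =====
theorem compute_parentheses_balance_spec : Claim_equal_compute_parentheses_balance := by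
  intro text _
  unfold Spec_compute_parentheses_balance compute_parentheses_balance compute_parentheses_balance_alt
  rw [pv_foldl_balance]
  simp [PySem.Str.count_eq, pv_count_single]
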